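-- pv_equiv track=rewrite | github.com/rb1t/the-farmer-was-raytraced | maze.py | get_neighbors_in_order
-- ===== SOURCE A (Python) =====
-- def get_neighbors_in_order(cur_dir, pos):
-- 	x, y = pos
-- 	# Directions: N,E,S,W
-- 	dirs = [(0,1), (1,0), (0,-1), (-1,0)]
--
-- 	# Map direction to index without using .index()
-- 	if cur_dir[0] == 0 and cur_dir[1] == 1:
-- 		dir_index = 0  # North
-- 	elif cur_dir[0] == 1 and cur_dir[1] == 0:
-- 		dir_index = 1  # East
-- 	elif cur_dir[0] == 0 and cur_dir[1] == -1:
-- 		dir_index = 2  # South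
-- 	elif cur_dir[0] == -1 and cur_dir[1] == 0:
-- 		dir_index = 3  # West
-- 	else:
-- 		dir_index = 0  # default North if unknown
--
-- 	# Right-hand order: right, forward, left, back
-- 	right_hand_order = [
-- 		dirs[(dir_index + 1) % 4],
-- 		dirs[dir_index],
-- 		dirs[(dir_index + 3) % 4],
-- 		dirs[(dir_index + 2) % 4]
-- 	]
--
-- 	neighbors = []
-- 	for d in right_hand_order:
-- 		n = (x + d[0], y + d[1])
-- 		neighbors.append(n)
-- 	return neighbors
-- ===== SOURCE B (Python) =====
-- def get_neighbors_in_order(cur_dir, pos):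
-- 	x, y = pos
-- 	dx, dy = cur_dir
-- 	if (dx, dy) not in ((0, 1), (1, 0), (0, -1), (-1, 0)):
-- 		dx, dy = 0, 1  # unknown direction: default to North, as the maze walker does
-- 	# right, forward, left, back via 90-degree rotations of (dx, dy)
-- 	offsets = [(dy, -dx), (dx, dy), (-dy, dx), (-dx, -dy)]
-- 	return [(x + ox, y + oy) for ox, oy in offsets]
-- ===== Notes on version B (the rewrite author's own statement) =====
-- stated objective: simpler
-- what changed: Replaces the direction-to-index lookup and modular indexing into a fixed table by direct 90-degree vector rotations of the (normalized) direction vector.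
import Mathlib
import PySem

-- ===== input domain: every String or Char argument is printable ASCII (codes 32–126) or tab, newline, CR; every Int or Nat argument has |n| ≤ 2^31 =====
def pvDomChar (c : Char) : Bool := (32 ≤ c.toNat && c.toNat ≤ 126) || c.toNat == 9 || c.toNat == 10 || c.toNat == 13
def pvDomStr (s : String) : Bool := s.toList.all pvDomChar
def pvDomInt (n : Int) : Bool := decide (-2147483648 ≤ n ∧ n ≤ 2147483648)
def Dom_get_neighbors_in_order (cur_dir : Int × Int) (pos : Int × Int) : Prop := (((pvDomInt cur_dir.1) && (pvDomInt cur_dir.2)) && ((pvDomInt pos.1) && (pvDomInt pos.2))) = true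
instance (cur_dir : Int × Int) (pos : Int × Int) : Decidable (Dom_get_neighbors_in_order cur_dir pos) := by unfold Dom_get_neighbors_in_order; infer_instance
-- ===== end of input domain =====

-- B replaces A's direction→index lookup plus modular table indexing by direct
-- 90-degree vector rotations of the (normalized) direction vector; objective: simpler.

-- ===== PORT A =====
def get_neighbors_in_order (cur_dir : Int × Int) (pos : Int × Int) : List (Int × Int) :=
  let x := pos.1
  let y := pos.2
  let dirs : List (Int × Int) := [(0,1), (1,0), (0,-1), (-1,0)]
  let dir_index : Nat :=
    if cur_dir.1 = 0 ∧ cur_dir.2 = 1 then 0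
    else if cur_dir.1 = 1 ∧ cur_dir.2 = 0 then 1
    else if cur_dir.1 = 0 ∧ cur_dir.2 = -1 then 2
    else if cur_dir.1 = -1 ∧ cur_dir.2 = 0 then 3
    else 0
  let right_hand_order : List (Int × Int) :=
    [ (PySem.List.pyGet? dirs ((dir_index + 1) % 4)).getD (0,0),
      (PySem.List.pyGet? dirs dir_index).getD (0,0),
      (PySem.List.pyGet? dirs ((dir_index + 3) % 4)).getD (0,0),
      (PySem.List.pyGet? dirs ((dir_index + 2) % 4)).getD (0,0) ]
  -- the indices are always in range (dir_index ∈ {0..3}), so the getD default is never used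
  right_hand_order.foldl (fun acc d => acc ++ [(x + d.1, y + d.2)]) []

-- ===== PORT B =====
def get_neighbors_in_order_alt (cur_dir : Int × Int) (pos : Int × Int) : List (Int × Int) :=
  let x := pos.1
  let y := pos.2
  let nd : Int × Int :=
    if cur_dir = (0,1) ∨ cur_dir = (1,0) ∨ cur_dir = (0,-1) ∨ cur_dir = (-1,0)
    then cur_dir else (0,1)
  let dx := nd.1
  let dy := nd.2
  let offsets : List (Int × Int) := [(dy, -dx), (dx, dy), (-dy, dx), (-dx, -dy)]
  offsets.map (fun o => (x + o.1, y + o.2))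

-- ===== PRECONDITION & SPEC =====
def Spec_get_neighbors_in_order (cur_dir : Int × Int) (pos : Int × Int) (out : List (Int × Int)) : Prop := out = get_neighbors_in_order_alt cur_dir pos
instance (cur_dir : Int × Int) (pos : Int × Int) (out : List (Int × Int)) : Decidable (Spec_get_neighbors_in_order cur_dir pos out) := by unfold Spec_get_neighbors_in_order; infer_instance

-- ===== CLAIM (what is proved, stated in full; the proofs are below) =====
def Claim_equal_get_neighbors_in_order : Prop := ∀ (cur_dir : Int × Int) (pos : Int × Int), Dom_get_neighbors_in_order cur_dir pos → Spec_get_neighbors_in_order cur_dir pos (get_neighbors_in_order cur_dir pos)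

-- ===== LEMMAS AND PROOFS =====

-- ===== VERDICT (by name: the statement is the Claim_ definition above) =====
theorem get_neighbors_in_order_spec : Claim_equal_get_neighbors_in_order := by
  intro cur_dir pos _
  unfold Spec_get_neighbors_in_order get_neighbors_in_order get_neighbors_in_order_alt
  obtain ⟨a, b⟩ := cur_dir
  by_cases h1 : a = 0 ∧ b = 1
  · simp [h1.1, h1.2, PySem.List.pyGet?, PySem.List.pyIdx?]
  · by_cases h2 : a = 1 ∧ b = 0
    · simp [h2.1, h2.2, PySem.List.pyGet?, PySem.List.pyIdx?]
    · by_cases h3 : a = 0 ∧ b = -1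
      · simp [h3.1, h3.2, PySem.List.pyGet?, PySem.List.pyIdx?]
      · by_cases h4 : a = -1 ∧ b = 0
        · simp [h4.1, h4.2, PySem.List.pyGet?, PySem.List.pyIdx?]
        · simp [h1, h2, h3, h4, PySem.List.pyGet?, PySem.List.pyIdx?]
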